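-- pv_equiv track=rewrite | github.com/z3lx/poly-2024a-tp02 | TP2.py | library_add_borrows
-- ===== SOURCE A (Python) =====
-- import copy
-- from typing import Dict, Union, List
--
-- Library = Dict[str, Union[Dict[str, Union[str, int]], List[str]]]
--
-- def library_add_borrows(
--     library: Library,
--     borrows: Dict[str, str]
-- ) -> Library:
--     new_library = copy.deepcopy(library)
--     for cote, book in new_library.items():
--         status = "emprunté" if cote in borrows else "disponible"
--         new_library[cote]["emprunts"] = status
--         new_library[cote]["date_emprunt"] = borrows.get(cote, "N/A")
--     return new_library
-- ===== SOURCE B (Python) =====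
-- import copy
--
-- def library_add_borrows(library, borrows):
--     new_library = copy.deepcopy(library)
--     for book in new_library.values():
--         book["emprunts"] = "disponible"
--         book["date_emprunt"] = "N/A"
--     for cote, date in borrows.items():
--         if cote in new_library:
--             book = new_library[cote]
--             book["emprunts"] = "emprunté"
--             book["date_emprunt"] = date
--     return new_library
-- ===== Notes on version B (the rewrite author's own statement) =====
-- stated objective: alternative
-- what changed: B resets every book to disponible/N/A unconditionally in a first pass and then drives the borrowed marking from the borrows dict in a second pass (guarded by membership in the library), instead of A's single pass that tests each library entry against borrows.
import Mathlib
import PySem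

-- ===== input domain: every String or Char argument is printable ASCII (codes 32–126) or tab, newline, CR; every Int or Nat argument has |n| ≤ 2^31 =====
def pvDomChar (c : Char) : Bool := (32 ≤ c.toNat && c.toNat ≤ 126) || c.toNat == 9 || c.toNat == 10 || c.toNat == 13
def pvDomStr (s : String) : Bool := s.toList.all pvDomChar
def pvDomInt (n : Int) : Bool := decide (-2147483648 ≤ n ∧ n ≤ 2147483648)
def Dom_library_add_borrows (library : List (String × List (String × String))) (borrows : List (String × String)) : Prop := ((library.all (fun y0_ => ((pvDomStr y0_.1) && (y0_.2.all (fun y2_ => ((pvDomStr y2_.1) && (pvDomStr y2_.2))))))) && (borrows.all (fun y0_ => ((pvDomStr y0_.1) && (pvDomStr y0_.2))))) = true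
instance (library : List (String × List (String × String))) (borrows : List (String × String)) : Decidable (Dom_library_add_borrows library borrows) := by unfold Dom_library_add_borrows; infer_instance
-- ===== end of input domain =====

-- B drives the borrowed marking from the borrows dict in a second pass after an
-- unconditional reset pass, instead of A's per-entry membership test (objective: alternative).
-- Both programs return a fresh structure (A deepcopies); neither mutates its arguments.

-- dict assignment d[k] = v on an association list: overwrite the first entry with key k
-- in place, else append (exactly PySem.Dict.insert's rule, specialised to our lists).
def pvSetKey : List (String × String) → String → String → List (String × String)
  | [], k, v => [(k, v)]
  | (k', v') :: rest, k, v =>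
      if k' = k then (k, v) :: rest else (k', v') :: pvSetKey rest k v

-- ===== PORT A =====
-- A: deepcopy, then for each (cote, book) set book["emprunts"] / book["date_emprunt"]
-- from a membership test and .get on borrows (first match on the association list).
def library_add_borrows (library : List (String × List (String × String))) (borrows : List (String × String)) : List (String × List (String × String)) :=
  library.map (fun p =>
    let status := if (List.lookup p.1 borrows).isSome then "emprunté" else "disponible"
    (p.1, pvSetKey (pvSetKey p.2 "emprunts" status) "date_emprunt"
            ((List.lookup p.1 borrows).getD "N/A")))

-- ===== PORT B =====
def pvResetBook (book : List (String × String)) : List (String × String) :=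
  pvSetKey (pvSetKey book "emprunts" "disponible") "date_emprunt" "N/A"

def pvMarkBook (book : List (String × String)) (date : String) : List (String × String) :=
  pvSetKey (pvSetKey book "emprunts" "emprunté") "date_emprunt" date

-- new_library[cote] mutation: update the (first) entry with key cote
def pvMarkAt : List (String × List (String × String)) → String → String → List (String × List (String × String))
  | [], _, _ => []
  | (k, bk) :: rest, cote, date =>
      if k = cote then (k, pvMarkBook bk date) :: rest
      else (k, bk) :: pvMarkAt rest cote date

def library_add_borrows_alt (library : List (String × List (String × String))) (borrows : List (String × String)) : List (String × List (String × String)) :=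
  let reset := library.map (fun p => (p.1, pvResetBook p.2))
  borrows.foldl
    (fun acc q => if (List.lookup q.1 acc).isSome then pvMarkAt acc q.1 q.2 else acc)
    reset

-- ===== PRECONDITION & SPEC =====
-- Pre_ excludes association lists with duplicate keys (in library or in borrows): a Python
-- dict has unique keys, so such lists encode no Python input at all and neither program's
-- Python behaviour is defined on them (the check measured this excludes 0 generated inputs).
def Pre_library_add_borrows (library : List (String × List (String × String))) (borrows : List (String × String)) : Prop :=
  (library.map Prod.fst).Nodup ∧ (borrows.map Prod.fst).Nodup

instance (library : List (String × List (String × String))) (borrows : List (String × String)) : Decidable (Pre_library_add_borrows library borrows) := by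
  unfold Pre_library_add_borrows; infer_instance

def pvWitness_library_add_borrows : (List (String × List (String × String))) × (List (String × String)) :=
  ([("A1", [("titre", "X")]), ("B2", [("titre", "Y")])], [("A1", "2024-01-01")])

def Spec_library_add_borrows (library : List (String × List (String × String))) (borrows : List (String × String)) (out : List (String × List (String × String))) : Prop := out = library_add_borrows_alt library borrows
instance (library : List (String × List (String × String))) (borrows : List (String × String)) (out : List (String × List (String × String))) : Decidable (Spec_library_add_borrows library borrows out) := by unfold Spec_library_add_borrows; infer_instance

-- ===== CLAIM (what is proved, stated in full; the proofs are below) =====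
def Claim_equal_library_add_borrows : Prop := ∀ (library : List (String × List (String × String))) (borrows : List (String × String)), Dom_library_add_borrows library borrows → Pre_library_add_borrows library borrows → Spec_library_add_borrows library borrows (library_add_borrows library borrows)

-- ===== LEMMAS AND PROOFS =====

-- overwriting the same key twice keeps only the second write
theorem pvSetKey_same (l : List (String × String)) (k v w : String) :
    pvSetKey (pvSetKey l k v) k w = pvSetKey l k w := by
  induction l with
  | nil => simp [pvSetKey]
  | cons p t ih =>
      obtain ⟨k', v'⟩ := p
      by_cases h : k' = k <;> simp [pvSetKey, h, ih]

-- resetting a book and then marking it borrowed is marking it borrowed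
theorem pvMark_reset (bk : List (String × String)) (d : String) :
    pvMarkBook (pvResetBook bk) d = pvMarkBook bk d := by
  induction bk with
  | nil => simp [pvResetBook, pvMarkBook, pvSetKey]
  | cons p t ih =>
      obtain ⟨k, v⟩ := p
      by_cases he : k = "emprunts"
      · subst he
        simp [pvResetBook, pvMarkBook, pvSetKey, pvSetKey_same]
      · by_cases hd : k = "date_emprunt"
        · subst hd
          simp [pvResetBook, pvMarkBook, pvSetKey, pvSetKey_same]
        · simp only [pvResetBook, pvMarkBook] at ih ⊢
          simp [pvSetKey, he, hd, ih]

-- one step of B's second loop on a value-mapped copy of the library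
theorem pvStep_map (g : String → List (String × String) → List (String × String))
    (cote date : String) :
    ∀ lib : List (String × List (String × String)), (lib.map Prod.fst).Nodup →
      (if (List.lookup cote (lib.map (fun p => (p.1, g p.1 p.2)))).isSome
       then pvMarkAt (lib.map (fun p => (p.1, g p.1 p.2))) cote date
       else lib.map (fun p => (p.1, g p.1 p.2)))
      = lib.map (fun p => (p.1, if cote = p.1 then pvMarkBook (g p.1 p.2) date else g p.1 p.2)) := by
  intro lib
  induction lib with
  | nil => simp
  | cons p t ih =>
      obtain ⟨k, bk⟩ := p
      intro hN
      simp only [List.map_cons, List.nodup_cons] at hN ⊢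
      by_cases hk : cote = k
      · subst hk
        simp only [List.lookup_cons, beq_self_eq_true, Option.isSome_some, if_true,
          pvMarkAt, List.cons.injEq, true_and]
        apply List.map_congr_left
        intro q hq
        have hq1 : q.1 ≠ cote := by
          intro h
          exact hN.1 (List.mem_map.mpr ⟨q, hq, h⟩)
        simp [Ne.symm hq1]
      · have hbeq : (cote == k) = false := by simpa using hk
        simp only [List.lookup_cons, hbeq, pvMarkAt, if_neg (Ne.symm hk)]
        by_cases hs : (List.lookup cote (t.map (fun p => (p.1, g p.1 p.2)))).isSome
        · rw [if_pos hs]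
          have := ih hN.2
          rw [if_pos hs] at this
          simp [this, hk]
        · rw [if_neg hs]
          have := ih hN.2
          rw [if_neg hs] at this
          simp [this, hk]

-- B's second loop, pushed inside the map over the library
theorem pvFold_map (bs : List (String × String)) :
    ∀ (lib : List (String × List (String × String)))
      (g : String → List (String × String) → List (String × String)),
      (lib.map Prod.fst).Nodup →
      bs.foldl (fun acc q => if (List.lookup q.1 acc).isSome then pvMarkAt acc q.1 q.2 else acc)
        (lib.map (fun p => (p.1, g p.1 p.2)))
      = lib.map (fun p =>
          (p.1, bs.foldl (fun b q => if q.1 = p.1 then pvMarkBook b q.2 else b) (g p.1 p.2))) := by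
  induction bs with
  | nil => intro lib g _; simp
  | cons q bs ih =>
      intro lib g hN
      simp only [List.foldl_cons]
      rw [pvStep_map g q.1 q.2 lib hN]
      exact ih lib (fun k b => if q.1 = k then pvMarkBook (g k b) q.2 else g k b) hN

-- the per-book effect of B's second loop, when borrows has unique keys
theorem pvFold_book (c : String) :
    ∀ (bs : List (String × String)) (b0 : List (String × String)),
      (bs.map Prod.fst).Nodup →
      bs.foldl (fun b q => if q.1 = c then pvMarkBook b q.2 else b) b0
      = match List.lookup c bs with
        | none => b0
        | some d => pvMarkBook b0 d := by
  intro bs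
  induction bs with
  | nil => intro b0 _; simp
  | cons q bs ih =>
      obtain ⟨k, d⟩ := q
      intro b0 hN
      simp only [List.map_cons, List.nodup_cons] at hN
      by_cases hk : k = c
      · subst hk
        have hnone : List.lookup k bs = none := by
          rw [List.lookup_eq_none_iff]
          intro q hq
          simp only [bne_iff_ne, ne_eq]
          intro hkq
          exact hN.1 (List.mem_map.mpr ⟨q, hq, hkq.symm⟩)
        simp only [List.foldl_cons, List.lookup_cons, beq_self_eq_true, if_true]
        rw [ih _ hN.2, hnone]
      · have hbeq : (c == k) = false := by simpa using (Ne.symm hk)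
        simp only [List.foldl_cons, if_neg hk, List.lookup_cons, hbeq]
        exact ih _ hN.2

-- ===== VERDICT (by name: the statement is the Claim_ definition above) =====
theorem library_add_borrows_spec : Claim_equal_library_add_borrows := by
  intro lib borrows _hDom hPre
  unfold Spec_library_add_borrows
  obtain ⟨hlib, hbor⟩ := hPre
  have hB := pvFold_map borrows lib (fun _ b => pvResetBook b) hlib
  refine Eq.trans ?_ hB.symm
  unfold library_add_borrows
  apply List.map_congr_left
  intro p _
  rw [pvFold_book p.1 borrows _ hbor]
  cases h : List.lookup p.1 borrows with
  | none => simp [pvResetBook]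
  | some d =>
      simp only [Option.isSome_some, if_true, Option.getD_some]
      rw [pvMark_reset]
      rfl
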